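-- pv_equiv track=rewrite | github.com/Denji7k/-Development-of-a-Comprehensive-Toolkit-for-Bioinformatics-Annotation- | Consensus and Profile.py | profile_matrix
-- ===== SOURCE A (Python) =====
-- def profile_matrix(parsed_fa):
--     sequences = list(parsed_fa.values())
--     matrix_size = len(sequences[0])
--     profile_matrix = {base: [0] * matrix_size for base in 'ATCG'}
--
--     for seq in sequences:
--         if len(seq) != matrix_size:
--             raise ValueError("All sequences must have the same length")
--
--     for seq in sequences:
--         for i, base in enumerate(seq):
--             if base in profile_matrix:
--                 profile_matrix[base][i] += 1
--
--     return profile_matrix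
-- ===== SOURCE B (Python) =====
-- def profile_matrix(parsed_fa):
--     sequences = list(parsed_fa.values())
--     matrix_size = len(sequences[0])
--
--     for seq in sequences:
--         if len(seq) != matrix_size:
--             raise ValueError("All sequences must have the same length")
--
--     columns = list(zip(*sequences))
--     return {base: [col.count(base) for col in columns] for base in 'ATCG'}
-- ===== Notes on version B (the rewrite author's own statement) =====
-- stated objective: idiomatic
-- what changed: Instead of scattering +=1 increments into a shared base->list dict sequence by sequence, B transposes the sequences with zip(*sequences) and builds each base's row independently by counting that base in each column.
import Mathlib
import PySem

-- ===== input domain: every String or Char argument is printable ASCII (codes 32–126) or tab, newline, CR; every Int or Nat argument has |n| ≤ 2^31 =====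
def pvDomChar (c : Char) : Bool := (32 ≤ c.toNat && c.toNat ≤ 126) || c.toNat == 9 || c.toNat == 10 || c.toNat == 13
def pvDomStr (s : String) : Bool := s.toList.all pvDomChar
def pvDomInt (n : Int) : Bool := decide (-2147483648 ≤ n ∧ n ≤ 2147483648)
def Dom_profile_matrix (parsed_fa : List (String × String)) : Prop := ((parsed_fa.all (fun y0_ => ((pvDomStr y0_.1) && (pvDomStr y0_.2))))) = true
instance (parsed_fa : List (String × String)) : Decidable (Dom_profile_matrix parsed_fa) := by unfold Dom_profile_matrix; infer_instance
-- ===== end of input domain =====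

-- B replaces A's sequence-by-sequence scatter of increments into a shared dict with a
-- transpose (zip(*sequences)) and an independent per-column count for each base (objective: idiomatic).
-- ===== PORT A =====
-- one step of A's inner loop: "if base in profile_matrix: profile_matrix[base][i] += 1"
-- (the enumerate index p.1 is always ≥ 0, so .toNat is exact here)
def pmStep (d : PySem.Dict Char (List Int)) (p : Int × Char) : PySem.Dict Char (List Int) :=
  if d.contains p.2 then d.modify p.2 [] (fun l => l.modify p.1.toNat (· + 1)) else d

-- literal port of A; the `sequences[0]` IndexError (empty dict) and the explicit
-- ValueError raise (unequal lengths) are excluded by Pre_profile_matrix below.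
def profile_matrix (parsed_fa : List (String × String)) : List (String × List Int) :=
  let sequences := (PySem.Dict.ofList parsed_fa).values
  let matrix_size := (sequences.headI).toList.length
  let init : PySem.Dict Char (List Int) := PySem.Dict.ofList
    [('A', List.replicate matrix_size 0), ('T', List.replicate matrix_size 0),
     ('C', List.replicate matrix_size 0), ('G', List.replicate matrix_size 0)]
  let final := sequences.foldl
    (fun d seq => (PySem.List.enumerate seq.toList).foldl pmStep d) init
  final.items.map (fun p => (String.mk [p.1], p.2))

-- ===== PORT B =====
-- list(zip(*rows)): exact — the columns 0 .. (minimum row length) - 1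
def pmColumns (rows : List (List Char)) : List (List Char) :=
  match rows with
  | [] => []
  | r :: rs => (List.range ((rs.map List.length).foldl min r.length)).map
      (fun i => (r :: rs).map (fun l => l.getD i ' '))

-- literal port of B (Source B); the same two raises are excluded by Pre_profile_matrix.
def profile_matrix_alt (parsed_fa : List (String × String)) : List (String × List Int) :=
  let sequences := (PySem.Dict.ofList parsed_fa).values.map String.toList
  let columns := pmColumns sequences
  ['A', 'T', 'C', 'G'].map
    (fun b => (String.mk [b], columns.map (fun col => (col.count b : Int))))

-- ===== PRECONDITION & SPEC =====
-- Pre_ excludes exactly the inputs where the Python A raises: the empty dict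
-- (IndexError on sequences[0]) and dicts whose values differ in length (ValueError).
def Pre_profile_matrix (parsed_fa : List (String × String)) : Prop :=
  parsed_fa ≠ [] ∧
  ∀ v ∈ (PySem.Dict.ofList parsed_fa).values,
    v.toList.length = ((PySem.Dict.ofList parsed_fa).values.headI).toList.length
instance (parsed_fa : List (String × String)) : Decidable (Pre_profile_matrix parsed_fa) := by
  unfold Pre_profile_matrix; infer_instance

def pvWitness_profile_matrix : (List (String × String)) := [("s1", "ACGT"), ("s2", "ANCA")]

def Spec_profile_matrix (parsed_fa : List (String × String)) (out : List (String × List Int)) : Prop := out = profile_matrix_alt parsed_fa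
instance (parsed_fa : List (String × String)) (out : List (String × List Int)) : Decidable (Spec_profile_matrix parsed_fa out) := by unfold Spec_profile_matrix; infer_instance

-- ===== CLAIM (what is proved, stated in full; the proofs are below) =====
def Claim_equal_profile_matrix : Prop := ∀ (parsed_fa : List (String × String)), Dom_profile_matrix parsed_fa → Pre_profile_matrix parsed_fa → Spec_profile_matrix parsed_fa (profile_matrix parsed_fa)

-- ===== LEMMAS AND PROOFS =====

-- the shape A's dict keeps throughout: the four fixed keys in creation order
def mk4 (la lt lc lg : List Int) : PySem.Dict Char (List Int) :=
  PySem.Dict.mk [('A', la), ('T', lt), ('C', lc), ('G', lg)]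

-- what A's inner loop does to the list of ONE base
def bumps (b : Char) (l : List Int) (ps : List (Int × Char)) : List Int :=
  ps.foldl (fun l p => if p.2 = b then l.modify p.1.toNat (· + 1) else l) l

-- the per-sequence pointwise effect: +1 where the sequence has base b
def zadd (b : Char) (l : List Int) (cs : List Char) : List Int :=
  List.zipWith (fun x c => if c = b then x + 1 else x) l cs

theorem pmStep_mk4 (la lt lc lg : List Int) (p : Int × Char) :
    pmStep (mk4 la lt lc lg) p =
      mk4 (if p.2 = 'A' then la.modify p.1.toNat (· + 1) else la)
          (if p.2 = 'T' then lt.modify p.1.toNat (· + 1) else lt)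
          (if p.2 = 'C' then lc.modify p.1.toNat (· + 1) else lc)
          (if p.2 = 'G' then lg.modify p.1.toNat (· + 1) else lg) := by
  obtain ⟨i, c⟩ := p
  by_cases hA : c = 'A' <;> by_cases hT : c = 'T' <;> by_cases hC : c = 'C' <;>
    by_cases hG : c = 'G' <;>
  simp_all [pmStep, mk4, PySem.Dict.contains, PySem.Dict.modify, PySem.Dict.insert,
    PySem.Dict.getD, PySem.Dict.get?] <;>
  try (intro h; rcases h with h | h | h | h <;> subst h <;> simp_all)

theorem foldl_pmStep_mk4 (ps : List (Int × Char)) (la lt lc lg : List Int) :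
    ps.foldl pmStep (mk4 la lt lc lg) =
      mk4 (bumps 'A' la ps) (bumps 'T' lt ps) (bumps 'C' lc ps) (bumps 'G' lg ps) := by
  induction ps generalizing la lt lc lg with
  | nil => rfl
  | cons p ps ih => simp [bumps, List.foldl_cons, pmStep_mk4, ih]

theorem modify_append_cons (pre : List Int) (x : Int) (suf : List Int) (f : Int → Int) :
    (pre ++ x :: suf).modify pre.length f = pre ++ f x :: suf := by
  rw [List.modify_eq_take_cons_drop (by simp)]
  simp [List.drop_append]

theorem bumps_enumerate_aux (b : Char) (cs : List Char) :
    ∀ (pre suf : List Int), suf.length = cs.length →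
      bumps b (pre ++ suf) (PySem.List.enumerate cs (pre.length : Int)) =
        pre ++ zadd b suf cs := by
  induction cs with
  | nil =>
    intro pre suf h
    have : suf = [] := List.eq_nil_of_length_eq_zero h
    simp [this, bumps, zadd, PySem.List.enumerate]
  | cons c cs ih =>
    intro pre suf h
    match suf with
    | [] => simp at h
    | x :: suf =>
      have hx : (pre ++ x :: suf).modify pre.length (· + 1) =
          pre ++ (x + 1) :: suf := modify_append_cons pre x suf (· + 1)
      have step : (if c = b then (pre ++ x :: suf).modify pre.length (· + 1)
            else pre ++ x :: suf) =
          (pre ++ [if c = b then x + 1 else x]) ++ suf := by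
        split <;> simp [hx]
      have hlen : ((pre ++ [if c = b then x + 1 else x]).length : Int) = (pre.length : Int) + 1 := by
        simp
      have h' : suf.length = cs.length := by simpa using h
      calc bumps b (pre ++ x :: suf) (PySem.List.enumerate (c :: cs) (pre.length : Int))
          = bumps b ((pre ++ [if c = b then x + 1 else x]) ++ suf)
              (PySem.List.enumerate cs ((pre.length : Int) + 1)) := by
            simp [bumps, PySem.List.enumerate, step]
        _ = (pre ++ [if c = b then x + 1 else x]) ++ zadd b suf cs := by
            rw [← hlen]; exact ih _ _ h'
        _ = pre ++ zadd b (x :: suf) (c :: cs) := by simp [zadd]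

theorem bumps_enumerate (b : Char) (cs : List Char) (l : List Int) (h : l.length = cs.length) :
    bumps b l (PySem.List.enumerate cs 0) = zadd b l cs := by
  simpa using bumps_enumerate_aux b cs [] l h

theorem zadd_length (b : Char) (l : List Int) (cs : List Char) (h : l.length = cs.length) :
    (zadd b l cs).length = l.length := by
  simp [zadd, h]

theorem foldl_zadd_eq_counts (b : Char) (seqs : List (List Char)) :
    ∀ (l : List Int), (∀ cs ∈ seqs, cs.length = l.length) →
      seqs.foldl (zadd b) l =
        (List.range l.length).map
          (fun i => l.getD i 0 + ((seqs.map (fun c => c.getD i ' ')).count b : Int)) := by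
  induction seqs with
  | nil =>
    intro l _
    simp only [List.foldl_nil, List.map_nil, List.count_nil]
    refine (List.ext_getElem (by simp) ?_).symm
    intro i hi hlt
    simp only [List.getElem_map, List.getElem_range]
    simp [List.getD, List.getElem?_eq_getElem hlt]
  | cons cs seqs ih =>
    intro l hall
    have hcs : cs.length = l.length := hall cs (by simp)
    have hlen : (zadd b l cs).length = l.length := zadd_length b l cs hcs.symm
    have hall' : ∀ c ∈ seqs, c.length = (zadd b l cs).length := by
      intro c hc; rw [hlen]; exact hall c (by simp [hc])
    rw [List.foldl_cons, ih (zadd b l cs) hall', hlen]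
    refine List.map_congr_left ?_
    intro i hi
    rw [List.mem_range] at hi
    have hiz : i < (zadd b l cs).length := by omega
    have hic : i < cs.length := by omega
    have h1 : (zadd b l cs).getD i 0 = l.getD i 0 + (if cs[i] = b then 1 else 0) := by
      rw [List.getD_eq_getElem _ _ hiz, List.getD_eq_getElem _ _ (by omega : i < l.length)]
      simp [zadd]
      split <;> simp
    have h2 : cs.getD i ' ' = cs[i] := List.getD_eq_getElem _ _ hic
    simp only [List.map_cons, List.count_cons, h1, h2]
    by_cases hb : cs[i] = b
    · simp only [hb, if_pos rfl, beq_self_eq_true, if_true]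
      push_cast
      ring
    · simp [hb]

theorem min_foldl_const (n : Nat) (xs : List Nat) (h : ∀ x ∈ xs, x = n) :
    xs.foldl min n = n := by
  induction xs with
  | nil => rfl
  | cons x xs ih => simp_all

theorem ofList4 (a b c d : List Int) :
    PySem.Dict.ofList [('A', a), ('T', b), ('C', c), ('G', d)] = mk4 a b c d := rfl

theorem foldl_outer_mk4 (vs : List String) (la lt lc lg : List Int) :
    vs.foldl (fun d seq => (PySem.List.enumerate seq.toList).foldl pmStep d) (mk4 la lt lc lg) =
      mk4 (vs.foldl (fun l seq => bumps 'A' l (PySem.List.enumerate seq.toList)) la)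
          (vs.foldl (fun l seq => bumps 'T' l (PySem.List.enumerate seq.toList)) lt)
          (vs.foldl (fun l seq => bumps 'C' l (PySem.List.enumerate seq.toList)) lc)
          (vs.foldl (fun l seq => bumps 'G' l (PySem.List.enumerate seq.toList)) lg) := by
  induction vs generalizing la lt lc lg with
  | nil => rfl
  | cons v vs ih => simp [List.foldl_cons, foldl_pmStep_mk4, ih]

theorem foldl_bumps_eq_zadd (b : Char) (ws : List (List Char)) :
    ∀ l : List Int, (∀ cs ∈ ws, cs.length = l.length) →
      ws.foldl (fun l cs => bumps b l (PySem.List.enumerate cs)) l = ws.foldl (zadd b) l := by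
  induction ws with
  | nil => intro l _; rfl
  | cons cs ws ih =>
    intro l hall
    have hcs : cs.length = l.length := hall cs (by simp)
    rw [List.foldl_cons, List.foldl_cons, bumps_enumerate b cs l hcs.symm]
    exact ih _ (fun c hc => by
      rw [zadd_length b l cs hcs.symm]; exact hall c (by simp [hc]))

theorem main_counts (vs : List String)
    (h : ∀ v ∈ vs, v.toList.length = vs.headI.toList.length) (b : Char) :
    vs.foldl (fun l seq => bumps b l (PySem.List.enumerate seq.toList))
        (List.replicate vs.headI.toList.length 0) =
      (pmColumns (vs.map String.toList)).map (fun col => (List.count b col : Int)) := by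
  have hfm : vs.foldl (fun l seq => bumps b l (PySem.List.enumerate seq.toList))
        (List.replicate vs.headI.toList.length 0) =
      (vs.map String.toList).foldl (fun l cs => bumps b l (PySem.List.enumerate cs))
        (List.replicate vs.headI.toList.length 0) := by rw [List.foldl_map]
  rw [hfm]
  have hws : ∀ cs ∈ vs.map String.toList, cs.length = vs.headI.toList.length := by
    intro cs hc
    obtain ⟨v, hv, rfl⟩ := List.mem_map.mp hc
    exact h v hv
  rw [foldl_bumps_eq_zadd b _ _ (by simpa using hws),
      foldl_zadd_eq_counts b _ _ (by simpa using hws)]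
  rcases vs with _ | ⟨v, vs'⟩
  · simp [pmColumns]
  · have hmin : List.foldl min v.toList.length (List.map (List.length ∘ String.toList) vs') =
        v.toList.length := by
      apply min_foldl_const
      intro x hx
      rw [List.mem_map] at hx
      obtain ⟨w, hw, rfl⟩ := hx
      simpa using h w (List.mem_cons_of_mem _ hw)
    simp only [pmColumns, List.map_cons, List.map_map, List.length_replicate,
      List.headI_cons, hmin]
    refine List.map_congr_left ?_
    intro i hi
    rw [List.mem_range] at hi
    simp [Function.comp]

-- ===== VERDICT (by name: the statement is the Claim_ definition above) =====
theorem profile_matrix_spec : Claim_equal_profile_matrix := by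
  intro parsed_fa _ hpre
  obtain ⟨-, hlen⟩ := hpre
  show profile_matrix parsed_fa = profile_matrix_alt parsed_fa
  unfold profile_matrix profile_matrix_alt
  simp only [ofList4, foldl_outer_mk4]
  rw [main_counts _ hlen 'A', main_counts _ hlen 'T',
      main_counts _ hlen 'C', main_counts _ hlen 'G']
  rfl
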